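-- pv_equiv track=rewrite | github.com/kjyeon1101/CodingTest | 프로그래머스/unrated/135808. 과일 장수/과일 장수.py | solution
-- ===== SOURCE A (Python) =====
-- def solution(k, m, score):
--     answer = 0
--     score = sorted(score, reverse=True)
--     i = 0
--     while i <= len(score) - m:
--         answer += min(score[i:i+m]) * m
--         i += m
--     return answer
-- ===== SOURCE B (Python) =====
-- def solution(k, m, score):
--     counts = {}
--     for v in score:
--         counts[v] = counts.get(v, 0) + 1
--     total = 0
--     pos = 0
--     for v in sorted(counts, reverse=True):
--         c = counts[v]
--         total += v * ((pos + c) // m - pos // m)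
--         pos += c
--     return total * m
-- ===== Notes on version B (the rewrite author's own statement) =====
-- stated objective: alternative
-- what changed: B never slices or scans groups: it builds a value->count histogram in one pass, sorts only the distinct values descending, and for each value-run counts the group-boundary positions falling inside the run arithmetically as (pos+c)//m - pos//m, so the answer is computed per distinct value instead of per group.
import Mathlib
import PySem

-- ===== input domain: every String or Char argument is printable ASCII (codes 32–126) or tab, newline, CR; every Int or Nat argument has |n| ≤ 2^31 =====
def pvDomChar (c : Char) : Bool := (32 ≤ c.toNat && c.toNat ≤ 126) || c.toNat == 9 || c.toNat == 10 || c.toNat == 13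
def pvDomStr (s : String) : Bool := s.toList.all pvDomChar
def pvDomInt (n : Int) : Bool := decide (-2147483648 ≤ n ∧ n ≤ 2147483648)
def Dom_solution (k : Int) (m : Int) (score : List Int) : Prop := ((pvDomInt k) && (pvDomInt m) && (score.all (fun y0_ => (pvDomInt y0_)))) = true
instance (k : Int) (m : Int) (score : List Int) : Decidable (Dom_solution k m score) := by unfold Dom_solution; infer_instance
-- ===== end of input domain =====

-- B replaces the per-group slice-and-min with a value->count histogram: only the distinct
-- values are sorted, and the boundary positions inside each value run are counted by
-- divisor arithmetic (objective: alternative).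

-- ===== PORT A =====
-- while i <= len(score) - m: answer += min(score[i:i+m]) * m; i += m
-- (fuel = score.length + 1 bounds the iteration count, which is ≤ length for m ≥ 1;
--  min() of an empty slice raises in Python — excluded by Pre_, the port uses .getD 0 there)
def solLoop (s : List Int) (m : Int) : Nat → Int → Int → Int
  | 0, _, acc => acc
  | Nat.succ fuel, i, acc =>
    if i ≤ (s.length : Int) - m then
      solLoop s m fuel (i + m)
        (acc + ((PySem.List.min? (PySem.List.slice s (some i) (some (i + m))) (fun x => x)).getD 0) * m)
    else acc

def solution (k : Int) (m : Int) (score : List Int) : Int :=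
  solLoop (PySem.List.sorted score (fun x => x) true) m (score.length + 1) 0 0

-- ===== PORT B =====
-- counts = {}; for v in score: counts[v] = counts.get(v, 0) + 1
-- total = 0; pos = 0
-- for v in sorted(counts, reverse=True): c = counts[v]; total += v * ((pos+c)//m - pos//m); pos += c
-- return total * m
def solution_alt (k : Int) (m : Int) (score : List Int) : Int :=
  let counts := score.foldl (fun d v => PySem.Dict.insert d v (PySem.Dict.getD d v 0 + 1))
    (PySem.Dict.empty : PySem.Dict Int Int)
  ((PySem.List.sorted (PySem.Dict.keys counts) (fun x => x) true).foldl
      (fun (p : Int × Int) v =>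
        let c := PySem.Dict.getD counts v 0
        (p.1 + v * (PySem.Int.floordiv (p.2 + c) m - PySem.Int.floordiv p.2 m), p.2 + c))
      (0, 0)).1 * m

-- ===== PRECONDITION & SPEC =====
-- Pre_ excludes only m ≤ 0, on which Python A always raises ValueError (min() of an empty slice).
def Pre_solution (k : Int) (m : Int) (score : List Int) : Prop := 1 ≤ m
instance (k : Int) (m : Int) (score : List Int) : Decidable (Pre_solution k m score) := by
  unfold Pre_solution; infer_instance

def pvWitness_solution : Int × Int × List Int := (0, 2, [4, 1, 2, 3, 5])

def Spec_solution (k : Int) (m : Int) (score : List Int) (out : Int) : Prop := out = solution_alt k m score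
instance (k : Int) (m : Int) (score : List Int) (out : Int) : Decidable (Spec_solution k m score out) := by
  unfold Spec_solution; infer_instance

-- ===== CLAIM (what is proved, stated in full; the proofs are below) =====
def Claim_equal_solution : Prop := ∀ (k : Int) (m : Int) (score : List Int), Dom_solution k m score → Pre_solution k m score → Spec_solution k m score (solution k m score)

-- ===== LEMMAS AND PROOFS =====

-- range(a, b, s) with 0 < s and a < b starts with a
lemma pyRange_pos_cons {a b s : Int} (hs : 0 < s) (hab : a < b) :
    PySem.List.pyRange a b s = a :: PySem.List.pyRange (a + s) b s := by
  rw [PySem.List.pyRange_of_pos _ _ hs, PySem.List.pyRange_of_pos _ _ hs]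
  have h2 : (b - a + s - 1) / s = (b - a - 1) / s + 1 := by
    rw [show b - a + s - 1 = (b - a - 1) + 1 * s by ring,
        Int.add_mul_ediv_right _ _ (by omega : s ≠ 0)]
  have hq : 0 ≤ (b - a - 1) / s := Int.ediv_nonneg (by omega) (by omega)
  by_cases hb : a + s < b
  · simp only [if_pos hab, if_pos hb, h2, show b - (a + s) + s - 1 = b - a - 1 by ring,
      Int.toNat_add hq (by omega : (0:Int) ≤ 1), Int.toNat_one,
      List.range_succ_eq_map, List.map_cons, List.map_map]
    refine congrArg₂ List.cons (by simp) ?_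
    refine List.map_congr_left (fun x _ => ?_)
    simp only [Function.comp]
    push_cast
    ring
  · have hq0 : (b - a - 1) / s = 0 := Int.ediv_eq_zero_of_lt (by omega) (by omega)
    simp only [if_pos hab, if_neg hb, h2, hq0]
    norm_num

-- the running-min fold over a descending list ends at the last element
lemma foldl_min_desc : ∀ (t : List Int) (x : Int),
    List.Pairwise (fun a b => b ≤ a) (x :: t) →
    List.foldl min x t = (x :: t).getLast (by simp)
  | [], x, _ => by simp
  | y :: t, x, h => by
    have hxy : y ≤ x := (List.pairwise_cons.1 h).1 y (by simp)
    have ht : List.Pairwise (fun a b => b ≤ a) (y :: t) := (List.pairwise_cons.1 h).2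
    have := foldl_min_desc t y ht
    simp only [List.foldl_cons, min_eq_right hxy]
    rw [this]
    simp [List.getLast]

-- Python's min of the descending chunk s[i:i+m] is the element at index i+m-1
lemma min_slice_desc (s : List Int) (i m : Int)
    (hs : List.Pairwise (fun a b => b ≤ a) s)
    (hi : 0 ≤ i) (hm : 1 ≤ m) (hlen : i + m ≤ (s.length : Int)) :
    (PySem.List.min? (PySem.List.slice s (some i) (some (i + m))) (fun x => x)).getD 0
      = PySem.List.pyGetD s (i + m - 1) 0 := by
  have hslice : PySem.List.slice s (some i) (some (i + m))
      = List.take m.toNat (List.drop i.toNat s) := by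
    rw [PySem.List.slice_toNat s hi (by omega)]
    congr 1
    omega
  have hlenc : (List.take m.toNat (List.drop i.toNat s)).length = m.toNat := by
    simp only [List.length_take, List.length_drop]
    omega
  have hcne : List.take m.toNat (List.drop i.toNat s) ≠ [] := by
    intro h
    rw [h] at hlenc
    simp at hlenc
    omega
  have hcdesc : List.Pairwise (fun a b : Int => b ≤ a) (List.take m.toNat (List.drop i.toNat s)) :=
    List.Pairwise.sublist ((List.take_sublist _ _).trans (List.drop_sublist _ _)) hs
  obtain ⟨x, t, hxt⟩ := List.exists_cons_of_ne_nil hcne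
  rw [hslice, hxt, PySem.List.min?_id_cons, Option.getD_some,
      foldl_min_desc t x (hxt ▸ hcdesc),
      PySem.List.pyGetD_eq_getElem s 0 (by omega) (by omega),
      List.getLast_eq_getElem]
  have hxt' : x :: t = List.take m.toNat (List.drop i.toNat s) := hxt.symm
  simp only [hxt', hlenc, List.getElem_take, List.getElem_drop]
  congr 1
  omega

-- the A-loop equals acc + (sum of the boundary elements) * m
lemma loop_eq (s : List Int) (m : Int) (hm : 1 ≤ m)
    (hs : List.Pairwise (fun a b => b ≤ a) s) :
    ∀ (fuel : Nat) (i acc : Int), 0 ≤ i → (s.length : Int) - i < fuel →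
      solLoop s m fuel i acc
        = acc + ((PySem.List.pyRange (i + m - 1) (s.length : Int) m).map
            (fun j => PySem.List.pyGetD s j 0)).sum * m
  | 0, i, acc, hi, hfuel => by
    have hnil : PySem.List.pyRange (i + m - 1) (s.length : Int) m = [] := by
      rw [PySem.List.pyRange_of_pos _ _ (by omega : (0:Int) < m),
          if_neg (by omega : ¬ (i + m - 1 < (s.length : Int)))]
      rfl
    simp [solLoop, hnil]
  | Nat.succ fuel, i, acc, hi, hfuel => by
    by_cases hcond : i ≤ (s.length : Int) - m
    · have hlt : i + m - 1 < (s.length : Int) := by omega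
      rw [solLoop, if_pos hcond, loop_eq s m hm hs fuel (i + m) _ (by omega) (by omega)]
      rw [pyRange_pos_cons (by omega) hlt]
      rw [min_slice_desc s i m hs hi hm (by omega)]
      have : i + m - 1 + m = i + m + m - 1 := by ring
      rw [List.map_cons, List.sum_cons, this]
      ring
    · have hnil : PySem.List.pyRange (i + m - 1) (s.length : Int) m = [] := by
        rw [PySem.List.pyRange_of_pos _ _ (by omega : (0:Int) < m)]
        rw [if_neg (by omega)]
        rfl
      rw [solLoop, if_neg hcond, hnil]
      simp

-- ===== B-side machinery =====

-- per-run formula: value * number of boundary positions (global index ≡ M-1 mod M) inside the run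
def runSum (sc : List Int) (M : Nat) : List Int → Nat → Int
  | [], _ => 0
  | v :: tl, pos =>
      v * ((((pos + sc.count v) / M - pos / M : Nat)) : Int) + runSum sc M tl (pos + sc.count v)

-- stride indices of A rewritten as Nat-range indices
lemma pyRange_stride (s : List Int) (M : Nat) (hM : 1 ≤ M) :
    (PySem.List.pyRange ((M : Int) - 1) ((s.length : Int)) (M : Int)).map
        (fun j => PySem.List.pyGetD s j 0)
      = (List.range (s.length / M)).map (fun t => s.getD (t * M + (M - 1)) 0) := by
  rw [PySem.List.pyRange_of_pos _ _ (by exact_mod_cast hM : (0:Int) < (M:Int))]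
  have hq : (((s.length : Int) - ((M:Int) - 1) + (M:Int) - 1) / (M:Int)).toNat = s.length / M := by
    have : ((s.length : Int) - ((M:Int) - 1) + (M:Int) - 1) = (s.length : Int) := by ring
    rw [this, Int.ofNat_ediv_ofNat]
    exact Int.toNat_natCast _
  by_cases hb : ((M:Int) - 1) < (s.length : Int)
  · rw [if_pos hb, hq, List.map_map]
    refine List.map_congr_left (fun t ht => ?_)
    simp only [Function.comp]
    have : ((M:Int) - 1) + (M:Int) * (t:Int) = ((t * M + (M - 1) : Nat) : Int) := by
      push_cast [Nat.cast_sub hM]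
      ring
    rw [this, PySem.List.pyGetD_natCast]
  · rw [if_neg hb]
    have : s.length / M = 0 := Nat.div_eq_of_lt (by omega)
    simp [this]

-- stride sum over the full range as a filtered sum over all indices
lemma nat_stride (s : List Int) (M : Nat) (hM : 1 ≤ M) : ∀ (n : Nat),
    ((List.range (n / M)).map (fun t => s.getD (t * M + (M - 1)) 0)).sum
      = ((List.range n).map (fun t => if (t + 1) % M = 0 then s.getD t 0 else 0)).sum
  | 0 => by simp [Nat.zero_div]
  | n + 1 => by
    have hsd : (n + 1) / M = n / M + if M ∣ (n + 1) then 1 else 0 := Nat.succ_div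
    have hdm : M ∣ (n + 1) ↔ (n + 1) % M = 0 := Nat.dvd_iff_mod_eq_zero
    rw [List.range_succ (n := n), List.map_append, List.sum_append, ← nat_stride s M hM n]
    by_cases hd : M ∣ (n + 1)
    · have hidx : (n / M) * M + (M - 1) = n := by
        have h1 : (n + 1) = ((n + 1) / M) * M := (Nat.div_mul_cancel hd).symm
        have h2 : (n + 1) / M = n / M + 1 := by rw [hsd, if_pos hd]
        rw [h2] at h1
        have : (n / M + 1) * M = n / M * M + M := by ring
        omega
      rw [hsd, if_pos hd, List.range_succ, List.map_append, List.sum_append]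
      simp [hidx, hdm.mp hd]
    · rw [hsd, if_neg hd]
      have h0 : (n + 1) % M ≠ 0 := fun h => hd (hdm.mpr h)
      simp [h0]

-- boundary count inside one constant run
lemma count_stride (M : Nat) (hM : 1 ≤ M) (v : Int) : ∀ (c pos : Nat),
    ((List.range c).map (fun t => if (pos + t + 1) % M = 0 then v else (0 : Int))).sum
      = v * ((((pos + c) / M - pos / M : Nat)) : Int)
  | 0, pos => by simp
  | c + 1, pos => by
    rw [List.range_succ, List.map_append, List.sum_append, count_stride M hM v c pos]
    have hsd : (pos + c + 1) / M = (pos + c) / M + if M ∣ (pos + c + 1) then 1 else 0 :=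
      Nat.succ_div
    have hle : pos / M ≤ (pos + c) / M := Nat.div_le_div_right (Nat.le_add_right _ _)
    have hdm : M ∣ (pos + c + 1) ↔ (pos + c + 1) % M = 0 :=
      Nat.dvd_iff_mod_eq_zero
    by_cases hd : M ∣ (pos + c + 1)
    · have h0 : (pos + c + 1) % M = 0 := hdm.mp hd
      rw [show pos + (c+1) = pos + c + 1 by ring]
      simp only [h0, if_pos, List.map_cons, List.map_nil, List.sum_cons, List.sum_nil]
      rw [hsd, if_pos hd,
        show (pos + c) / M + 1 - pos / M = ((pos + c) / M - pos / M) + 1 by omega]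
      push_cast
      ring
    · have h0 : (pos + c + 1) % M ≠ 0 := fun h => hd (hdm.mpr h)
      rw [show pos + (c+1) = pos + c + 1 by ring]
      simp only [if_neg h0, List.map_cons, List.map_nil, List.sum_cons, List.sum_nil]
      rw [hsd, if_neg hd]
      simp

-- filtered sum over the run decomposition = runSum
lemma flat_stride (sc : List Int) (M : Nat) (hM : 1 ≤ M) : ∀ (vs : List Int) (pos : Nat),
    ((List.range ((vs.flatMap (fun v => List.replicate (sc.count v) v)).length)).map
        (fun t => if (pos + t + 1) % M = 0
          then (vs.flatMap (fun v => List.replicate (sc.count v) v)).getD t 0 else 0)).sum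
      = runSum sc M vs pos
  | [], pos => by simp [runSum]
  | v :: tl, pos => by
    have hlen : ((v :: tl).flatMap (fun v => List.replicate (sc.count v) v)).length
        = sc.count v + (tl.flatMap (fun v => List.replicate (sc.count v) v)).length := by
      simp [List.flatMap_cons]
    rw [hlen, List.range_add, List.map_append, List.sum_append]
    have h1 : ((List.range (sc.count v)).map
        (fun t => if (pos + t + 1) % M = 0
          then ((v :: tl).flatMap (fun v => List.replicate (sc.count v) v)).getD t 0 else 0)).sum
        = ((List.range (sc.count v)).map
            (fun t => if (pos + t + 1) % M = 0 then v else (0:Int))).sum := by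
      refine congrArg List.sum (List.map_congr_left (fun t ht => ?_))
      have htc : t < sc.count v := List.mem_range.mp ht
      have : ((v :: tl).flatMap (fun v => List.replicate (sc.count v) v)).getD t 0 = v := by
        rw [List.flatMap_cons, List.getD_append _ _ _ _ (by simpa using htc)]
        simp [List.getD, htc]
      rw [this]
    have h2 : (((List.range (tl.flatMap (fun v => List.replicate (sc.count v) v)).length).map
          (fun t' => sc.count v + t')).map
        (fun t => if (pos + t + 1) % M = 0
          then ((v :: tl).flatMap (fun v => List.replicate (sc.count v) v)).getD t 0 else 0)).sum
        = ((List.range (tl.flatMap (fun v => List.replicate (sc.count v) v)).length).map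
          (fun t' => if ((pos + sc.count v) + t' + 1) % M = 0
            then (tl.flatMap (fun v => List.replicate (sc.count v) v)).getD t' 0 else 0)).sum := by
      rw [List.map_map]
      refine congrArg List.sum (List.map_congr_left (fun t' ht' => ?_))
      simp only [Function.comp]
      have hg : ((v :: tl).flatMap (fun v => List.replicate (sc.count v) v)).getD (sc.count v + t') 0
          = (tl.flatMap (fun v => List.replicate (sc.count v) v)).getD t' 0 := by
        rw [List.flatMap_cons, List.getD_append_right _ _ _ _ (by simp)]
        simp
      rw [show pos + (sc.count v + t') + 1 = (pos + sc.count v) + t' + 1 by ring, hg]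
    rw [h1, h2, count_stride M hM v (sc.count v) pos, flat_stride sc M hM tl (pos + sc.count v)]
    rfl

-- counting occurrences across the run decomposition
lemma count_runs (sc : List Int) : ∀ (vs : List Int), vs.Nodup → ∀ (x : Int),
    (vs.flatMap (fun v => List.replicate (sc.count v) v)).count x
      = if x ∈ vs then sc.count x else 0
  | [], _, x => by simp
  | v :: tl, hnd, x => by
    rw [List.flatMap_cons, List.count_append,
      count_runs sc tl (List.nodup_cons.mp hnd).2 x, List.count_replicate]
    by_cases hxv : x = v
    · subst hxv
      have : x ∉ tl := (List.nodup_cons.mp hnd).1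
      simp [this]
    · simp [hxv, List.mem_cons]
      intro h
      exact absurd h.symm hxv

-- the run decomposition of a strictly descending value list is descending
lemma runs_pairwise (sc : List Int) : ∀ (vs : List Int),
    vs.Pairwise (fun a b => b < a) →
    (vs.flatMap (fun v => List.replicate (sc.count v) v)).Pairwise (fun a b : Int => b ≤ a)
  | [], _ => by simp
  | v :: tl, h => by
    rw [List.flatMap_cons, List.pairwise_append]
    refine ⟨List.pairwise_replicate.mpr (Or.inr le_rfl),
      runs_pairwise sc tl (List.pairwise_cons.mp h).2, ?_⟩
    intro a ha b hb
    have hav : a = v := List.eq_of_mem_replicate ha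
    obtain ⟨u, hu, hbu⟩ := List.mem_flatMap.mp hb
    have hbu' : b = u := List.eq_of_mem_replicate hbu
    have : u < v := (List.pairwise_cons.mp h).1 u hu
    omega

-- the descending sort is the concatenation of its value runs
lemma runs_eq (score : List Int) :
    PySem.List.sorted score (fun x => x) true
      = (PySem.List.sorted (PySem.Set.ofList score) (fun x => x) true).flatMap
          (fun v => List.replicate (score.count v) v) := by
  set vs := PySem.List.sorted (PySem.Set.ofList score) (fun x => x) true with hvs
  have hperm0 : vs.Perm (PySem.Set.ofList score) := PySem.List.sorted_perm _ _ _
  have hnd : vs.Nodup := hperm0.nodup_iff.mpr (PySem.Set.nodup_ofList score)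
  have hdesc : vs.Pairwise (fun a b => b ≤ a) := PySem.List.sorted_pairwise_rev _ _
  have hstrict : vs.Pairwise (fun a b => b < a) := by
    have hne : vs.Pairwise (fun a b : Int => a ≠ b) := hnd
    exact (hdesc.and hne).imp (fun h => lt_of_le_of_ne h.1 (Ne.symm h.2))
  have hmemvs : ∀ x : Int, x ∈ vs ↔ x ∈ score := by
    intro x
    rw [hperm0.mem_iff]
    simp [PySem.Set.mem_ofList]
  set L := vs.flatMap (fun v => List.replicate (score.count v) v) with hL
  have hpermL : L.Perm score := by
    rw [List.perm_iff_count]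
    intro x
    rw [hL, count_runs score vs hnd x]
    by_cases hx : x ∈ vs
    · simp [hx]
    · have : x ∉ score := fun h => hx ((hmemvs x).mpr h)
      simp [hx, List.count_eq_zero_of_not_mem this]
  have hsortL : L.Pairwise (fun a b : Int => b ≤ a) := runs_pairwise score vs hstrict
  have hsortS : (PySem.List.sorted score (fun x => x) true).Pairwise (fun a b : Int => b ≤ a) :=
    PySem.List.sorted_pairwise_rev _ _
  have hpermS : (PySem.List.sorted score (fun x => x) true).Perm L :=
    (PySem.List.sorted_perm _ _ _).trans hpermL.symm
  exact hpermS.eq_of_pairwise (fun a b _ _ h1 h2 => le_antisymm h2 h1) hsortS hsortL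

-- B's fold computes runSum
lemma fold_runSum (sc : List Int) (M : Nat) (hM : 1 ≤ M) : ∀ (vs : List Int) (t : Int) (pos : Nat),
    (vs.foldl
        (fun (p : Int × Int) v =>
          (p.1 + v * (PySem.Int.floordiv (p.2 + (sc.count v : Int)) (M : Int)
              - PySem.Int.floordiv p.2 (M : Int)), p.2 + (sc.count v : Int)))
        (t, (pos : Int))).1
      = t + runSum sc M vs pos
  | [], t, pos => by simp [runSum]
  | v :: tl, t, pos => by
    have hc : ((pos : Int) + (sc.count v : Int)) = ((pos + sc.count v : Nat) : Int) := by
      push_cast; ring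
    have hle : pos / M ≤ (pos + sc.count v) / M := Nat.div_le_div_right (Nat.le_add_right _ _)
    rw [List.foldl_cons]
    simp only [hc, PySem.Int.floordiv_natCast]
    rw [fold_runSum sc M hM tl _ (pos + sc.count v)]
    rw [runSum]
    push_cast [Nat.cast_sub hle]
    ring

-- ===== VERDICT (by name: the statement is the Claim_ definition above) =====
theorem solution_spec : Claim_equal_solution := by
  intro k m score _ hpre
  unfold Spec_solution solution solution_alt
  have hm1 : (1 : Int) ≤ m := hpre
  have hM1 : 1 ≤ m.toNat := by omega
  have hm' : m = (m.toNat : Int) := by omega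
  set s := PySem.List.sorted score (fun x => x) true with hs
  have hsp : List.Pairwise (fun a b : Int => b ≤ a) s := PySem.List.sorted_pairwise_rev _ _
  have hlen : s.length = score.length := PySem.List.length_sorted _ _ _
  -- A side
  rw [loop_eq s m hm1 hsp (score.length + 1) 0 0 le_rfl (by rw [hlen]; omega)]
  rw [show (0 : Int) + m - 1 = m - 1 by ring]
  rw [hm', pyRange_stride s m.toNat hM1, nat_stride s m.toNat hM1 s.length]
  -- B side
  simp only [PySem.Dict.foldl_insert_getD_add_one_eq_counter, PySem.Dict.keys_counter,
    PySem.Dict.getD_counter]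
  rw [show ((0:Int), (0:Int)) = ((0:Int), ((0:Nat):Int)) from rfl,
    fold_runSum score m.toNat hM1 _ 0 0]
  -- both sides through the run decomposition
  rw [hs, runs_eq score]
  rw [show (fun t => if (t + 1) % m.toNat = 0
        then ((PySem.List.sorted (PySem.Set.ofList score) (fun x => x) true).flatMap
          (fun v => List.replicate (score.count v) v)).getD t 0 else 0)
      = (fun t => if ((0:Nat) + t + 1) % m.toNat = 0
        then ((PySem.List.sorted (PySem.Set.ofList score) (fun x => x) true).flatMap
          (fun v => List.replicate (score.count v) v)).getD t 0 else 0) by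
    funext t; rw [Nat.zero_add]]
  rw [flat_stride score m.toNat hM1 _ 0]
  ring
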